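-- pv_equiv track=rewrite | github.com/TechniPoet/PythonMusic | Theory.py | toFlat
-- ===== SOURCE A (Python) =====
-- def toFlat(seedList):
--     returnList = ['Ab' if note=='G#' else note for note in seedList]
--     returnList = ['Bb' if note=='A#' else note for note in returnList]
--     returnList = ['Cb' if note=='B#' else note for note in returnList]
--     returnList = ['Db' if note=='C#' else note for note in returnList]
--     returnList = ['Eb' if note=='D#' else note for note in returnList]
--     returnList = ['Gb' if note=='F#' else note for note in returnList]
--     return returnList
-- ===== SOURCE B (Python) =====
-- def toFlat(seedList):
--     out = []
--     for note in seedList: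
--         if len(note) == 2 and note[1] == '#' and note[0] in 'ABCDFG':
--             out.append(chr(ord('A') + (ord(note[0]) - ord('A') + 1) % 7) + 'b')
--         else:
--             out.append(note)
--     return out
-- ===== Notes on version B (the rewrite author's own statement) =====
-- stated objective: alternative
-- what changed: B has no sharp->flat table at all: a single accumulator loop detects a sharp by shape (two chars, second '#', first in ABCDFG) and computes the flat name arithmetically as the next letter mod 7 followed by 'b', replacing A's six hard-coded whole-list substitution passes.
import Mathlib
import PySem

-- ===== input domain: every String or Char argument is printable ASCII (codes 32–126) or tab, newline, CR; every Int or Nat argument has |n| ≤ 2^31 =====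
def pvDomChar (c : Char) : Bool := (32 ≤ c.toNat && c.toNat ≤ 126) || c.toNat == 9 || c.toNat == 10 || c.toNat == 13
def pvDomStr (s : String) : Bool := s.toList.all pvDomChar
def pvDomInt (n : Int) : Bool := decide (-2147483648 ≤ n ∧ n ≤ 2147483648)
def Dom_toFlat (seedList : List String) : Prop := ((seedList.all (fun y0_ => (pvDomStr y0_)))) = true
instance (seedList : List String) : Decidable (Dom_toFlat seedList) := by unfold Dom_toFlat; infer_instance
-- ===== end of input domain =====

-- B computes the flat name arithmetically from the note's characters (next letter mod 7 + 'b')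
-- in a single accumulator loop, instead of A's six whole-list substitution passes (objective: alternative).

-- ===== PORT A =====
-- six passes, one per sharp, exactly as A's comprehensions
def toFlat (seedList : List String) : List String :=
  let r1 := seedList.map (fun note => if note = "G#" then "Ab" else note)
  let r2 := r1.map (fun note => if note = "A#" then "Bb" else note)
  let r3 := r2.map (fun note => if note = "B#" then "Cb" else note)
  let r4 := r3.map (fun note => if note = "C#" then "Db" else note)
  let r5 := r4.map (fun note => if note = "D#" then "Eb" else note)
  r5.map (fun note => if note = "F#" then "Gb" else note)

-- ===== PORT B =====
-- explicit loop with an output accumulator; a note 'X#' with X in ABCDFG becomes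
-- chr(ord('A') + (ord(X) - ord('A') + 1) % 7) + 'b'  (indexing guarded by the length test, as in Python's short-circuit 'and')
def toFlat_alt (seedList : List String) : List String :=
  seedList.foldl (fun out note =>
    let cs := note.toList
    if cs.length = 2 ∧ cs.getD 1 ' ' = '#' ∧ cs.getD 0 ' ' ∈ ("ABCDFG").toList then
      out ++ [String.ofList [Char.ofNat ('A'.toNat + (((cs.getD 0 ' ').toNat - 'A'.toNat + 1) % 7)), 'b']]
    else
      out ++ [note]) []

-- ===== PRECONDITION & SPEC =====
def Spec_toFlat (seedList : List String) (out : List String) : Prop := out = toFlat_alt seedList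
instance (seedList : List String) (out : List String) : Decidable (Spec_toFlat seedList out) := by unfold Spec_toFlat; infer_instance

-- ===== CLAIM (what is proved, stated in full; the proofs are below) =====
def Claim_equal_toFlat : Prop := ∀ (seedList : List String), Dom_toFlat seedList → Spec_toFlat seedList (toFlat seedList)

-- ===== LEMMAS AND PROOFS =====

-- A's six sequential per-element substitutions, as one per-element function
def aStep (note : String) : String :=
  let n1 := if note = "G#" then "Ab" else note
  let n2 := if n1 = "A#" then "Bb" else n1
  let n3 := if n2 = "B#" then "Cb" else n2
  let n4 := if n3 = "C#" then "Db" else n3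
  let n5 := if n4 = "D#" then "Eb" else n4
  if n5 = "F#" then "Gb" else n5

-- B's per-element function
def bStep (note : String) : String :=
  let cs := note.toList
  if cs.length = 2 ∧ cs.getD 1 ' ' = '#' ∧ cs.getD 0 ' ' ∈ ("ABCDFG").toList then
    String.ofList [Char.ofNat ('A'.toNat + (((cs.getD 0 ' ').toNat - 'A'.toNat + 1) % 7)), 'b']
  else note

theorem toFlat_eq_map (seedList : List String) : toFlat seedList = seedList.map aStep := by
  unfold toFlat
  simp only [List.map_map]
  rfl

theorem foldl_append_map {α β : Type} (f : α → β) (l : List α) (acc : List β) :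
    l.foldl (fun out x => out ++ [f x]) acc = acc ++ l.map f := by
  induction l generalizing acc with
  | nil => simp
  | cons x xs ih => simp [List.foldl, ih]

theorem toFlat_alt_eq_map (seedList : List String) : toFlat_alt seedList = seedList.map bStep := by
  unfold toFlat_alt
  have hfun : (fun (out : List String) (note : String) =>
      let cs := note.toList
      if cs.length = 2 ∧ cs.getD 1 ' ' = '#' ∧ cs.getD 0 ' ' ∈ ("ABCDFG").toList then
        out ++ [String.ofList [Char.ofNat ('A'.toNat + (((cs.getD 0 ' ').toNat - 'A'.toNat + 1) % 7)), 'b']]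
      else
        out ++ [note]) = fun out note => out ++ [bStep note] := by
    funext out note
    unfold bStep
    exact (apply_ite (fun x => out ++ [x]) _ _ _).symm
  rw [hfun, foldl_append_map bStep seedList []]
  simp

theorem ofList_eq_iff (l l' : List Char) : String.ofList l = String.ofList l' ↔ l = l' := by
  constructor
  · intro h; have := congrArg String.toList h; simpa using this
  · intro h; rw [h]

theorem point (cs : List Char) : aStep (String.ofList cs) = bStep (String.ofList cs) := by
  unfold aStep bStep
  simp only [String.toList_ofList]
  have e1 := ofList_eq_iff cs ['G','#']
  have e2 := ofList_eq_iff cs ['A','#']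
  have e3 := ofList_eq_iff cs ['B','#']
  have e4 := ofList_eq_iff cs ['C','#']
  have e5 := ofList_eq_iff cs ['D','#']
  have e6 := ofList_eq_iff cs ['F','#']
  match cs, e1, e2, e3, e4, e5, e6 with
  | [c, d], e1, e2, e3, e4, e5, e6 =>
    by_cases hd : d = '#'
    · subst hd
      by_cases hc : c ∈ ("ABCDFG").toList
      · have : c = 'A' ∨ c = 'B' ∨ c = 'C' ∨ c = 'D' ∨ c = 'F' ∨ c = 'G' := by
          simpa using hc
        rcases this with h|h|h|h|h|h <;> subst h <;> decide
      · have hmem : c = 'A' ∨ c = 'B' ∨ c = 'C' ∨ c = 'D' ∨ c = 'F' ∨ c = 'G' ↔ False := by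
          constructor
          · intro h; exact hc (by simpa using h)
          · intro h; exact h.elim
        have hA : c ≠ 'A' := fun h => hmem.mp (Or.inl h)
        have hB : c ≠ 'B' := fun h => hmem.mp (Or.inr (Or.inl h))
        have hC : c ≠ 'C' := fun h => hmem.mp (Or.inr (Or.inr (Or.inl h)))
        have hD : c ≠ 'D' := fun h => hmem.mp (Or.inr (Or.inr (Or.inr (Or.inl h))))
        have hF : c ≠ 'F' := fun h => hmem.mp (Or.inr (Or.inr (Or.inr (Or.inr (Or.inl h)))))
        have hG : c ≠ 'G' := fun h => hmem.mp (Or.inr (Or.inr (Or.inr (Or.inr (Or.inr h)))))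
        simp [e1, e2, e3, e4, e5, e6, hA, hB, hC, hD, hF, hG,]
    · simp [e1, e2, e3, e4, e5, e6, hd]
  | [], e1, e2, e3, e4, e5, e6 => simp [e1, e2, e3, e4, e5, e6]
  | [c], e1, e2, e3, e4, e5, e6 => simp [e1, e2, e3, e4, e5, e6]
  | c :: d :: e :: rest, e1, e2, e3, e4, e5, e6 => simp [e1, e2, e3, e4, e5, e6]

theorem point' (note : String) : aStep note = bStep note := by
  have h := point note.toList
  simpa using h

-- ===== VERDICT (by name: the statement is the Claim_ definition above) =====
theorem toFlat_spec : Claim_equal_toFlat := by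
  intro seedList _
  unfold Spec_toFlat
  rw [toFlat_eq_map, toFlat_alt_eq_map]
  exact List.map_congr_left (fun note _ => point' note)
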